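-- pv_equiv track=rewrite | github.com/sm2774us/competitive_programming | Dynamic_Programming/027_leetcode_P_1547_MinimumCostToCutAStick/Solution.py | minCost_solution_4
-- ===== SOURCE A (Python) =====
-- from typing import List
--
-- def minCost_solution_4(n: int, cuts: List[int]) -> int:
--     cuts.extend([0, n])
--     cuts.sort()
--
--     dp = [[0] * len(cuts) for _ in cuts]
--     for i in reversed(range(len(cuts))):
--         for j in range(i + 2, len(cuts)):
--             dp[i][j] = (
--                 cuts[j]
--                 - cuts[i]
--                 + min(dp[i][k] + dp[k][j] for k in range(i + 1, j))
--             )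
--     return dp[0][-1]
-- ===== SOURCE B (Python) =====
-- def minCost_solution_4(n, cuts):
--     # top-down memoized recursion over intervals keyed by a dict (A fills a full
--     # bottom-up 2D table with nested index loops).
--     xs = sorted(cuts + [0, n])
--     m = len(xs)
--     memo = {}
--
--     def f(i, j):
--         if j - i < 2:
--             return 0
--         key = (i, j)
--         if key not in memo:
--             memo[key] = xs[j] - xs[i] + min(f(i, k) + f(k, j) for k in range(i + 1, j))
--         return memo[key]
--
--     # warm the memo on short intervals first so the recursion stays shallow
--     for gap in range(2, m):
--         for i in range(m - gap):
--             f(i, i + gap)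
--     return f(0, m - 1)
-- ===== Notes on version B (the rewrite author's own statement) =====
-- stated objective: alternative
-- what changed: Replaces A's bottom-up 2D DP table filled by reversed nested index loops with a dictionary-memoized recursive cost function over intervals, warmed in increasing gap order.
import Mathlib
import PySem

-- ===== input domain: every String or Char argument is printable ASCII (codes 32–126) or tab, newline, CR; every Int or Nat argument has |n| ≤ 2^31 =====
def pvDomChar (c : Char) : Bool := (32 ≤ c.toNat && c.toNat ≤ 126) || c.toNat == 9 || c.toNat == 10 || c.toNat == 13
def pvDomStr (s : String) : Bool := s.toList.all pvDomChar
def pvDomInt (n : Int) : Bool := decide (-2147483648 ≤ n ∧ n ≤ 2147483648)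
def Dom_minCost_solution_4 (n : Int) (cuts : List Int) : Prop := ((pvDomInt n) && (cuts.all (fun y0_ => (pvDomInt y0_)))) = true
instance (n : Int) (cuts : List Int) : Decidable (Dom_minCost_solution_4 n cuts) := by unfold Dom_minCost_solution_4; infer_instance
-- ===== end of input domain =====

-- B replaces A's bottom-up full DP table (triple nested loops) with a top-down memoized
-- recursion over intervals; equal return value (A additionally mutates `cuts` in place,
-- B does not — the equivalence proved here is about the return value only).

-- ===== PORT A =====
-- dp[i][j] read/write helpers for the nested-list table (indices always in range in A's loops,
-- so getD is exact for Python's dp[i][k] / dp[k][j] / cuts[j]).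
def pvGet2 (dp : List (List Int)) (i j : Nat) : Int := (dp.getD i []).getD j 0

-- body of A's inner loop: dp[i][j] = cuts[j] - cuts[i] + min(dp[i][k] + dp[k][j] for k in range(i+1, j))
def aStep (c : List Int) (i : Nat) (dp : List (List Int)) (j : Nat) : List (List Int) :=
  let v := c.getD j 0 - c.getD i 0 +
    ((PySem.List.min? ((List.range' (i+1) (j - (i+1))).map
        (fun k => pvGet2 dp i k + pvGet2 dp k j)) (fun x => x)).getD 0)
  dp.set i ((dp.getD i []).set j v)

def minCost_solution_4 (n : Int) (cuts : List Int) : Int :=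
  -- cuts.extend([0, n]); cuts.sort()
  let c := PySem.List.sorted (cuts ++ [0, n]) (fun x => x) false
  let m := c.length
  let dp0 : List (List Int) := List.replicate m (List.replicate m 0)
  let dp := (List.range m).reverse.foldl
      (fun dp i => (List.range' (i+2) (m - (i+2))).foldl (aStep c i) dp) dp0
  -- dp[0][-1]  (m ≥ 2 always, so index -1 is m-1)
  pvGet2 dp 0 (m - 1)

-- ===== PORT B =====
-- f(i, j) of Source B (the memo dict and the gap-order warm-up loop are value-transparent:
-- they only pre-populate values f itself defines; `attach` is only for termination)
def altRec (c : List Int) (i j : Nat) : Int :=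
  if j - i < 2 then 0
  else c.getD j 0 - c.getD i 0 +
    ((PySem.List.min? ((List.range' (i+1) (j - (i+1))).attach.map
        (fun k => altRec c i k.1 + altRec c k.1 j)) (fun x => x)).getD 0)
termination_by j - i
decreasing_by
  · have h := List.mem_range'.mp k.2; omega
  · have h := List.mem_range'.mp k.2; omega

def minCost_solution_4_alt (n : Int) (cuts : List Int) : Int :=
  let xs := PySem.List.sorted (cuts ++ [0, n]) (fun x => x) false
  altRec xs 0 (xs.length - 1)

-- ===== PRECONDITION & SPEC =====
def Spec_minCost_solution_4 (n : Int) (cuts : List Int) (out : Int) : Prop := out = minCost_solution_4_alt n cuts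
instance (n : Int) (cuts : List Int) (out : Int) : Decidable (Spec_minCost_solution_4 n cuts out) := by unfold Spec_minCost_solution_4; infer_instance

-- ===== CLAIM (what is proved, stated in full; the proofs are below) =====
def Claim_equal_minCost_solution_4 : Prop := ∀ (n : Int) (cuts : List Int), Dom_minCost_solution_4 n cuts → Spec_minCost_solution_4 n cuts (minCost_solution_4 n cuts)

-- ===== LEMMAS AND PROOFS =====

-- altRec without the termination `attach`
theorem altRec_unfold (c : List Int) (i j : Nat) (h : 2 ≤ j - i) :
    altRec c i j = c.getD j 0 - c.getD i 0 +
      ((PySem.List.min? ((List.range' (i+1) (j - (i+1))).map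
          (fun k => altRec c i k + altRec c k j)) (fun x => x)).getD 0) := by
  rw [altRec]
  have hne : ¬ (j - i < 2) := by omega
  simp only [hne, if_false]
  congr 2
  rw [show (fun (k : {x // x ∈ List.range' (i+1) (j - (i+1))}) => altRec c i k.1 + altRec c k.1 j)
        = (fun k => altRec c i k + altRec c k j) ∘ Subtype.val from rfl,
      ← List.map_map, List.attach_map_subtype_val]

theorem altRec_small (c : List Int) (i j : Nat) (h : j - i < 2) : altRec c i j = 0 := by
  rw [altRec]; simp [h]

-- invariants for A's table
def Shape (m : Nat) (dp : List (List Int)) : Prop :=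
  dp.length = m ∧ ∀ r ∈ dp, r.length = m

def RowsHigh (c : List Int) (t : Nat) (dp : List (List Int)) : Prop :=
  ∀ i j, t ≤ i → i < c.length → j < c.length → pvGet2 dp i j = altRec c i j

def RowsLowZero (t : Nat) (dp : List (List Int)) : Prop :=
  ∀ i j, i < t → pvGet2 dp i j = 0

def RowT (c : List Int) (t s : Nat) (dp : List (List Int)) : Prop :=
  ∀ j, j < c.length → pvGet2 dp t j = if j < s then altRec c t j else 0

theorem getD_set_self {A : Type} (l : List A) (i : Nat) (a d : A) (h : i < l.length) :
    (l.set i a).getD i d = a := by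
  rw [List.getD_eq_getElem?_getD, List.getElem?_set_self h]; rfl

theorem getD_set_ne {A : Type} (l : List A) (i i' : Nat) (a d : A) (h : i ≠ i') :
    (l.set i a).getD i' d = l.getD i' d := by
  rw [List.getD_eq_getElem?_getD, List.getElem?_set_ne h, ← List.getD_eq_getElem?_getD]

theorem get2_set (dp : List (List Int)) (i j : Nat) (v : Int)
    (hi : i < dp.length) (i' j' : Nat) :
    pvGet2 (dp.set i ((dp.getD i []).set j v)) i' j' =
      if i' = i ∧ j' = j ∧ j < (dp.getD i []).length then v else pvGet2 dp i' j' := by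
  unfold pvGet2
  by_cases hii : i' = i
  · subst hii
    rw [getD_set_self _ _ _ _ hi]
    by_cases hjj : j' = j
    · subst hjj
      by_cases hjl : j' < (dp.getD i' []).length
      · rw [if_pos ⟨rfl, rfl, hjl⟩, getD_set_self _ _ _ _ hjl]
      · rw [if_neg (by tauto), List.set_eq_of_length_le (by omega)]
    · rw [if_neg (by tauto), getD_set_ne _ _ _ _ _ (by omega)]
  · rw [if_neg (by tauto), getD_set_ne _ _ _ _ _ (by omega)]

theorem shape_getD_len (m : Nat) (dp : List (List Int)) (h : Shape m dp) (i : Nat)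
    (hi : i < m) : (dp.getD i []).length = m := by
  obtain ⟨h1, h2⟩ := h
  have : i < dp.length := by omega
  rw [List.getD_eq_getElem?_getD, List.getElem?_eq_getElem this]
  exact h2 _ (dp.getElem_mem this)

theorem inner_inv (c : List Int) (t : Nat) :
    ∀ e s dp, t + 2 ≤ s → s + e ≤ c.length →
    Shape c.length dp → RowsHigh c (t+1) dp → RowsLowZero t dp → RowT c t s dp →
    Shape c.length ((List.range' s e).foldl (aStep c t) dp) ∧
    RowsHigh c (t+1) ((List.range' s e).foldl (aStep c t) dp) ∧
    RowsLowZero t ((List.range' s e).foldl (aStep c t) dp) ∧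
    RowT c t (s+e) ((List.range' s e).foldl (aStep c t) dp) := by
  intro e
  induction e with
  | zero => intro s dp _ _ h1 h2 h3 h4; simpa using ⟨h1, h2, h3, h4⟩
  | succ e ih =>
    intro s dp hs hse hShape hHigh hLow hRow
    rw [List.range'_succ, List.foldl_cons]
    have hsm : s < c.length := by omega
    have htm : t < c.length := by omega
    have htlen : t < dp.length := by rw [hShape.1]; omega
    have hrowlen : (dp.getD t []).length = c.length := shape_getD_len _ _ hShape t htm
    -- the value written equals altRec c t s
    have hv : (c.getD s 0 - c.getD t 0 +
        ((PySem.List.min? ((List.range' (t+1) (s - (t+1))).map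
            (fun k => pvGet2 dp t k + pvGet2 dp k s)) (fun x => x)).getD 0)) = altRec c t s := by
      rw [altRec_unfold c t s (by omega)]
      have hmap : (List.range' (t+1) (s - (t+1))).map (fun k => pvGet2 dp t k + pvGet2 dp k s)
          = (List.range' (t+1) (s - (t+1))).map (fun k => altRec c t k + altRec c k s) := by
        apply List.map_congr_left
        intro k hk
        have hkb := List.mem_range'.mp hk
        have hk1 : pvGet2 dp t k = altRec c t k := by
          have := hRow k (by omega)
          rw [this, if_pos (by omega)]
        have hk2 : pvGet2 dp k s = altRec c k s := hHigh k s (by omega) (by omega) hsm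
        rw [hk1, hk2]
      rw [hmap]
    have hstep : ∀ i' j', pvGet2 (aStep c t dp s) i' j' =
        if i' = t ∧ j' = s then altRec c t s else pvGet2 dp i' j' := by
      intro i' j'
      unfold aStep
      rw [get2_set dp t s _ htlen i' j', hv]
      by_cases h1 : i' = t ∧ j' = s
      · rw [if_pos ⟨h1.1, h1.2, by omega⟩, if_pos h1]
      · rw [if_neg (by tauto), if_neg h1]
    have hShape' : Shape c.length (aStep c t dp s) := by
      constructor
      · unfold aStep; rw [List.length_set]; exact hShape.1
      · intro r hr
        unfold aStep at hr
        rcases List.mem_or_eq_of_mem_set hr with h | h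
        · exact hShape.2 _ h
        · rw [h, List.length_set]; rw [hrowlen]
    refine ih (s+1) (aStep c t dp s) (by omega) (by omega) hShape' ?_ ?_ ?_ |>.imp id
      (fun h => h.imp id (fun h => h.imp id (by rw [show s + 1 + e = s + (e+1) by omega]; exact id)))
    · intro i j hi him hjm
      rw [hstep, if_neg (by omega), hHigh i j hi him hjm]
    · intro i j hi
      rw [hstep, if_neg (by omega), hLow i j hi]
    · intro j hjm
      rw [hstep]
      by_cases hjs : j = s
      · subst hjs; rw [if_pos ⟨rfl, rfl⟩, if_pos (by omega)]
      · rw [if_neg (by tauto), hRow j hjm]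
        by_cases h1 : j < s
        · rw [if_pos h1, if_pos (by omega)]
        · rw [if_neg h1, if_neg (by omega)]

theorem outer_inv (c : List Int) :
    ∀ t dp, t ≤ c.length →
    Shape c.length dp → RowsHigh c t dp → RowsLowZero t dp →
    RowsHigh c 0 ((List.range t).reverse.foldl
      (fun dp i => (List.range' (i+2) (c.length - (i+2))).foldl (aStep c i) dp) dp) := by
  intro t
  induction t with
  | zero => intro dp _ _ h _; simpa using h
  | succ t ih =>
    intro dp ht hShape hHigh hLow
    rw [List.range_succ, List.reverse_append, List.reverse_singleton, List.singleton_append,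
        List.foldl_cons]
    have hLowT : RowsLowZero t dp := fun i j hi => hLow i j (by omega)
    by_cases hcase : t + 2 ≤ c.length
    · have hRow : RowT c t (t+2) dp := by
        intro j hjm
        rw [hLow t j (by omega)]
        by_cases h1 : j < t + 2
        · rw [if_pos h1, altRec_small c t j (by omega)]
        · rw [if_neg h1]
      obtain ⟨h1, h2, h3, h4⟩ := inner_inv c t (c.length - (t+2)) (t+2) dp (by omega)
        (by omega) hShape hHigh hLowT hRow
      apply ih _ (by omega) h1 _ h3
      intro i j hi him hjm
      by_cases hit : i = t
      · subst hit
        rw [h4 j hjm, if_pos (by omega)]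
      · exact h2 i j (by omega) him hjm
    · -- t + 2 > c.length: inner loop is empty
      have he : c.length - (t+2) = 0 := by omega
      rw [he]
      simp only [List.range'_zero, List.foldl_nil]
      apply ih _ (by omega) hShape _ hLowT
      intro i j hi him hjm
      by_cases hit : i = t
      · subst hit
        rw [hLow i j (by omega), altRec_small c i j (by omega)]
      · exact hHigh i j (by omega) him hjm

theorem replicate_get2 (m : Nat) (i j : Nat) :
    pvGet2 (List.replicate m (List.replicate m (0:Int))) i j = 0 := by
  simp only [pvGet2, List.getD_eq_getElem?_getD, List.getElem?_replicate]
  split_ifs <;> simp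

-- ===== VERDICT (by name: the statement is the Claim_ definition above) =====
theorem minCost_solution_4_spec : Claim_equal_minCost_solution_4 := by
  intro n cuts _
  unfold Spec_minCost_solution_4 minCost_solution_4 minCost_solution_4_alt
  set c := PySem.List.sorted (cuts ++ [0, n]) (fun x => x) false with hc
  have hm : 2 ≤ c.length := by
    rw [hc, PySem.List.length_sorted, List.length_append]
    simp
  have hShape : Shape c.length (List.replicate c.length (List.replicate c.length (0:Int))) := by
    constructor
    · simp
    · intro r hr; rw [List.eq_of_mem_replicate hr]; simp
  have hHigh : RowsHigh c c.length (List.replicate c.length (List.replicate c.length (0:Int))) := by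
    intro i j hi him _; omega
  have hLow : RowsLowZero c.length (List.replicate c.length (List.replicate c.length (0:Int))) := by
    intro i j _; exact replicate_get2 _ _ _
  have h := outer_inv c c.length _ le_rfl hShape hHigh hLow
  exact h 0 (c.length - 1) (by omega) (by omega) (by omega)
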